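-- pv_equiv track=rewrite | github.com/ojsellers/advent-of-code | 2023/day13/solution.py | reflection_lines_sum
-- ===== SOURCE A (Python) =====
-- import itertools
--
-- def check_col(x: int, pattern: list[str], smudges: int) -> bool:
--     to_check = x if x < len(pattern[0]) / 2 else len(pattern[0]) - x
--     errors = 0
--     for row, i in itertools.product(pattern, range(to_check)):
--         if row[x - (i + 1)] != row[x + i]:
--             errors += 1
--             if errors > smudges:
--                 return False
--     return errors >= smudges
--
-- def check_row(y: int, pattern: list[str], smudges: int) -> bool:
--     to_check = y if y < len(pattern) / 2 else len(pattern) - y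
--     errors = 0
--     for x, i in itertools.product(range(len(pattern[0])), range(to_check)):
--         if pattern[y - (i + 1)][x] != pattern[y + i][x]:
--             errors += 1
--             if errors > smudges:
--                 return False
--     return errors >= smudges
--
-- def reflection_lines_sum(
--     patterns: list[list[list[str]]], smudges: int = 0
-- ) -> int:
--     sum_val = 0
--     for pattern in patterns:
--         col_is = [
--             x
--             for x in range(1, len(pattern[0]))
--             if check_col(x, pattern, smudges)
--         ]
--         row_is = [
--             y for y in range(1, len(pattern)) if check_row(y, pattern, smudges)
--         ]
--         sum_val += sum(col_is) + sum(row_is) * 100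
--     return sum_val
-- ===== SOURCE B (Python) =====
-- def _diff(a, b):
--     return sum(x != y for x, y in zip(a, b))
--
--
-- def _score(rows, smudges):
--     total = 0
--     n = len(rows)
--     for y in range(1, n):
--         d = 0
--         for i in range(min(y, n - y)):
--             d += _diff(rows[y - 1 - i], rows[y + i])
--         if d == smudges:
--             total += y
--     return total
--
--
-- def reflection_lines_sum(patterns, smudges=0):
--     total = 0
--     for pattern in patterns:
--         cols = [''.join(row[x] for row in pattern)
--                 for x in range(len(pattern[0]))]
--         total += _score(cols, smudges) + 100 * _score(pattern, smudges)
--     return total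
-- ===== Notes on version B (the rewrite author's own statement) =====
-- stated objective: simpler
-- what changed: B replaces the two near-duplicate early-exit checkers over itertools.product (column-major for rows) by one scorer applied to the pattern and to its transpose, summing per-pair zip-based row mismatch counts and comparing the total to smudges directly.
-- intended difference: On a negative smudge count with some pattern containing a perfect reflection line, A's 'errors >= smudges' comparison accepts every perfect line and returns the positive line sum (e.g. 101 on ([["aa","aa"]], -1)), while B finds no line with exactly a negative number of mismatches and returns 0 — the intended value, since no line can have a negative number of smudges. — e.g. on reflection_lines_sum([["aa", "aa"]], -1): A returns 101, B returns 0
-- outside the precondition, e.g. on reflection_lines_sum([['.##.', '...#', '##']], 0): A returns 0, B raises IndexError; on reflection_lines_sum([['#', '#.', '.#.#']], 1): A returns 200, B returns 0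
import Mathlib
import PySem

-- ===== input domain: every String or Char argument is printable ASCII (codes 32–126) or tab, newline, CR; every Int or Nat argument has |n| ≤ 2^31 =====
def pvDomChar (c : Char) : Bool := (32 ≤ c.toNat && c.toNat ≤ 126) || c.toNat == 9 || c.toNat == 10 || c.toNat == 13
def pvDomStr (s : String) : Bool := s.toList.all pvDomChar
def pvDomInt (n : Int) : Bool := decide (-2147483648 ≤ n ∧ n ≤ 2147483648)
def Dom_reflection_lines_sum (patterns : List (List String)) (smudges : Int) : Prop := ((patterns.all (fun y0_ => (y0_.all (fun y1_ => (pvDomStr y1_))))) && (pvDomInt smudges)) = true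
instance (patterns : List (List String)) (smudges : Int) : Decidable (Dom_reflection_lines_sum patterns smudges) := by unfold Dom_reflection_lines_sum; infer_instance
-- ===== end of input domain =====

-- B replaces A's two near-duplicate early-exit checkers over itertools.product by one scorer
-- applied to the pattern and to its transpose, summing per-pair zip-based mismatch counts and
-- comparing the total to smudges directly (objective: simpler; same asymptotic cost).

-- ===== PORT A =====
-- row[i] (a char; IndexError is excluded by Pre_)
def pvCharA (s : String) (i : Int) : Char := (PySem.Str.pyGet? s i).getD ' '

-- itertools.product(l1, l2): pairs in row-major order
def pvProductA {α β : Type} (l1 : List α) (l2 : List β) : List (α × β) :=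
  l1.flatMap (fun a => l2.map (fun b => (a, b)))

-- the shared loop body of check_col / check_row: count mismatches with early 'return False'
def pvGoA {α : Type} (smudges : Int) (f : α → Bool) : List α → Int → Bool
  | [], errors => decide (errors ≥ smudges)
  | p :: ps, errors =>
    if f p then
      if errors + 1 > smudges then false else pvGoA smudges f ps (errors + 1)
    else pvGoA smudges f ps errors

-- 'x < len(pattern[0]) / 2' with Python's real division: x < w/2 ↔ 2*x < w
def pvCheckCol (x : Int) (pattern : List String) (smudges : Int) : Bool :=
  let w : Int := PySem.Str.len ((PySem.List.pyGet? pattern 0).getD "")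
  let toCheck : Int := if 2 * x < w then x else w - x
  pvGoA smudges
    (fun ri => pvCharA ri.1 (x - (ri.2 + 1)) != pvCharA ri.1 (x + ri.2))
    (pvProductA pattern (PySem.List.pyRange 0 toCheck 1)) 0

def pvCheckRow (y : Int) (pattern : List String) (smudges : Int) : Bool :=
  let toCheck : Int := if 2 * y < (pattern.length : Int) then y else (pattern.length : Int) - y
  pvGoA smudges
    (fun xi => pvCharA ((PySem.List.pyGet? pattern (y - (xi.2 + 1))).getD "") xi.1 !=
               pvCharA ((PySem.List.pyGet? pattern (y + xi.2)).getD "") xi.1)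
    (pvProductA (PySem.List.pyRange 0 (PySem.Str.len ((PySem.List.pyGet? pattern 0).getD "")) 1)
                (PySem.List.pyRange 0 toCheck 1)) 0

def reflection_lines_sum (patterns : List (List String)) (smudges : Int) : Int :=
  patterns.foldl (fun sum_val pattern =>
    let col_is := (PySem.List.pyRange 1 (PySem.Str.len ((PySem.List.pyGet? pattern 0).getD "")) 1).filter
      (fun x => pvCheckCol x pattern smudges)
    let row_is := (PySem.List.pyRange 1 (pattern.length : Int) 1).filter
      (fun y => pvCheckRow y pattern smudges)
    sum_val + (col_is.sum + row_is.sum * 100)) 0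

-- ===== PORT B =====
-- sum(x != y for x, y in zip(a, b))
def pvDiffB (a b : String) : Int :=
  (a.toList.zip b.toList).foldl (fun n p => n + (if p.1 != p.2 then 1 else 0)) 0

-- rows[k] (IndexError excluded by Pre_)
def pvRowB (rows : List String) (k : Int) : String := (PySem.List.pyGet? rows k).getD ""

def pvScoreB (rows : List String) (smudges : Int) : Int :=
  (PySem.List.pyRange 1 (rows.length : Int) 1).foldl (fun total y =>
    let d := (PySem.List.pyRange 0 (min y ((rows.length : Int) - y)) 1).foldl
      (fun d i => d + pvDiffB (pvRowB rows (y - 1 - i)) (pvRowB rows (y + i))) 0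
    if d = smudges then total + y else total) 0

def reflection_lines_sum_alt (patterns : List (List String)) (smudges : Int) : Int :=
  patterns.foldl (fun total pattern =>
    -- ''.join(row[x] for row in pattern) = the string of the chars row[x]; exact on Pre_
    let cols := (PySem.List.pyRange 0 (PySem.Str.len ((PySem.List.pyGet? pattern 0).getD "")) 1).map
      (fun x => String.ofList (pattern.map (fun row => (PySem.Str.pyGet? row x).getD ' ')))
    total + (pvScoreB cols smudges + 100 * pvScoreB pattern smudges)) 0

-- ===== PRECONDITION & SPEC =====
-- Pre_ keeps the function's natural domain of rectangular, non-empty grids: on a pattern that is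
-- empty or has rows of differing lengths A raises IndexError or, when its early exit happens to
-- dodge the short row, returns a value that depends on that accident.
def Pre_reflection_lines_sum (patterns : List (List String)) (smudges : Int) : Prop :=
  ∀ p ∈ patterns, p ≠ [] ∧
    ∀ row ∈ p, row.toList.length = (p.head?.getD "").toList.length
instance (patterns : List (List String)) (smudges : Int) : Decidable (Pre_reflection_lines_sum patterns smudges) := by unfold Pre_reflection_lines_sum; infer_instance

def pvWitness_reflection_lines_sum : List (List String) × Int := ([["#.", "#.", "##"]], 0)

-- a perfect mirror fold of the list after position k: one side of the fold, reversed,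
-- is a prefix of the other
def pvMirrorAt {α : Type} (l : List α) (k : Nat) : Prop :=
  (l.take k).reverse <+: l.drop k ∨ l.drop k <+: (l.take k).reverse

-- On a negative smudge count with some pattern containing a perfect reflection line, A's
-- 'errors >= smudges' comparison accepts every perfect line (it returns the positive line sum),
-- while B finds no line with exactly a negative number of mismatches and returns 0 — the
-- intended value, since no line can have a negative number of smudges.
def D_reflection_lines_sum (patterns : List (List String)) (smudges : Int) : Prop :=
  smudges < 0 ∧ ∃ p ∈ patterns,
    (∃ x ∈ List.range ((p.head?.getD "").toList.length), 0 < x ∧ ∀ row ∈ p, pvMirrorAt row.toList x) ∨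
    (∃ y ∈ List.range p.length, 0 < y ∧ pvMirrorAt (p.map String.toList) y)
instance (patterns : List (List String)) (smudges : Int) : Decidable (D_reflection_lines_sum patterns smudges) := by unfold D_reflection_lines_sum pvMirrorAt; infer_instance

def Spec_reflection_lines_sum (patterns : List (List String)) (smudges : Int) (out : Int) : Prop := ¬ D_reflection_lines_sum patterns smudges → out = reflection_lines_sum_alt patterns smudges
instance (patterns : List (List String)) (smudges : Int) (out : Int) : Decidable (Spec_reflection_lines_sum patterns smudges out) := by unfold Spec_reflection_lines_sum; infer_instance

def pvDiffWitness_reflection_lines_sum : List (List String) × Int := ([["aa", "aa"]], -1)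
def pvDiffWitnessOut_reflection_lines_sum : Int × Int := (101, 0)

-- ===== CLAIM (what is proved, stated in full; the proofs are below) =====
def Claim_unchanged_reflection_lines_sum : Prop := ∀ (patterns : List (List String)) (smudges : Int), Dom_reflection_lines_sum patterns smudges → Pre_reflection_lines_sum patterns smudges → Spec_reflection_lines_sum patterns smudges (reflection_lines_sum patterns smudges)
def Claim_changed_reflection_lines_sum : Prop := Dom_reflection_lines_sum (pvDiffWitness_reflection_lines_sum.1) (pvDiffWitness_reflection_lines_sum.2) ∧ Pre_reflection_lines_sum (pvDiffWitness_reflection_lines_sum.1) (pvDiffWitness_reflection_lines_sum.2) ∧ D_reflection_lines_sum (pvDiffWitness_reflection_lines_sum.1) (pvDiffWitness_reflection_lines_sum.2) ∧ reflection_lines_sum (pvDiffWitness_reflection_lines_sum.1) (pvDiffWitness_reflection_lines_sum.2) = pvDiffWitnessOut_reflection_lines_sum.1 ∧ reflection_lines_sum_alt (pvDiffWitness_reflection_lines_sum.1) (pvDiffWitness_reflection_lines_sum.2) = pvDiffWitnessOut_reflection_lines_sum.2 ∧ pvDiffWitnessOut_reflection_lines_sum.1 ≠ pvDiffWitnessO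ut_reflection_lines_sum.2
def Claim_exact_reflection_lines_sum : Prop := ∀ (patterns : List (List String)) (smudges : Int), Dom_reflection_lines_sum patterns smudges → Pre_reflection_lines_sum patterns smudges → D_reflection_lines_sum patterns smudges → reflection_lines_sum patterns smudges ≠ reflection_lines_sum_alt patterns smudges

-- ===== LEMMAS AND PROOFS =====

-- mismatch count of a list of tests, as a 0/1 sum
def pvCnt {α : Type} (f : α → Bool) (l : List α) : Int :=
  (l.map (fun p => if f p then (1 : Int) else 0)).sum

theorem pvCnt_nonneg {α : Type} (f : α → Bool) (l : List α) : 0 ≤ pvCnt f l := by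
  induction l with
  | nil => simp [pvCnt]
  | cons a l ih => simp only [pvCnt, List.map_cons, List.sum_cons] at *; split <;> omega

theorem pvCnt_cons {α : Type} (f : α → Bool) (a : α) (l : List α) :
    pvCnt f (a :: l) = (if f a then (1:Int) else 0) + pvCnt f l := by
  simp [pvCnt]

-- A's early-exit loop computes 'total mismatch count = smudges' (for 0 ≤ errors ≤ smudges)
theorem pvGoA_eq {α : Type} (smudges : Int) (f : α → Bool) (ps : List α) (e : Int)
    (he : e ≤ smudges) : pvGoA smudges f ps e = decide (e + pvCnt f ps = smudges) := by
  induction ps generalizing e with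
  | nil => simp [pvGoA, pvCnt]; omega
  | cons p ps ih =>
    by_cases hf : f p
    · have hcons : pvCnt f (p :: ps) = 1 + pvCnt f ps := by simp [pvCnt_cons, hf]
      rw [hcons]
      by_cases hgt : e + 1 > smudges
      · have hc := pvCnt_nonneg f ps
        have h2 : pvGoA smudges f (p :: ps) e = false := by simp [pvGoA, hf, hgt]
        rw [h2]
        symm
        rw [decide_eq_false_iff_not]
        omega
      · have h2 : pvGoA smudges f (p :: ps) e = pvGoA smudges f ps (e + 1) := by
          simp [pvGoA, hf, hgt]
        rw [h2, ih (e + 1) (by omega), decide_eq_decide]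
        omega
    · have hcons : pvCnt f (p :: ps) = pvCnt f ps := by simp [pvCnt_cons, hf]
      have h2 : pvGoA smudges f (p :: ps) e = pvGoA smudges f ps e := by simp [pvGoA, hf]
      rw [hcons, h2, ih e he]

-- from errors = 0 the loop accepts exactly 'count = smudges' (a negative budget acts as 0)
theorem pvGoA_start {α : Type} (s : Int) (f : α → Bool) (ps : List α) :
    pvGoA s f ps 0 = decide (pvCnt f ps = max s 0) := by
  by_cases hs : 0 ≤ s
  · rw [pvGoA_eq s f ps 0 hs, decide_eq_decide]
    omega
  · induction ps with
    | nil => simp [pvGoA, pvCnt]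
    | cons p ps ih =>
      by_cases hf : f p
      · have h2 : pvGoA s f (p :: ps) 0 = false := by
          simp only [pvGoA, hf, if_true]
          rw [if_pos (by omega : (0:Int) + 1 > s)]
        rw [h2]
        have hc := pvCnt_nonneg f ps
        have hcons : pvCnt f (p :: ps) = 1 + pvCnt f ps := by simp [pvCnt_cons, hf]
        symm
        rw [decide_eq_false_iff_not, hcons]
        omega
      · have h2 : pvGoA s f (p :: ps) 0 = pvGoA s f ps 0 := by simp [pvGoA, hf]
        have hcons : pvCnt f (p :: ps) = pvCnt f ps := by simp [pvCnt_cons, hf]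
        rw [h2, ih, hcons]

-- count over itertools.product = sum over the first list of inner counts
theorem pvCnt_product {α β : Type} (f : α × β → Bool) (l1 : List α) (l2 : List β) :
    pvCnt f (pvProductA l1 l2) = (l1.map (fun a => pvCnt (fun b => f (a, b)) l2)).sum := by
  induction l1 with
  | nil => simp [pvCnt, pvProductA]
  | cons a l1 ih =>
    simp only [pvProductA, List.flatMap_cons, List.map_cons, List.sum_cons] at *
    rw [← ih]
    simp [pvCnt, Function.comp_def]

-- swap a double sum over two lists
theorem pvSum_swap {α β : Type} (g : α → β → Int) (l1 : List α) (l2 : List β) :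
    (l1.map (fun a => (l2.map (fun b => g a b)).sum)).sum
      = (l2.map (fun b => (l1.map (fun a => g a b)).sum)).sum := by
  induction l1 with
  | nil => simp
  | cons a l1 ih =>
    simp only [List.map_cons, List.sum_cons, ih]
    rw [← PySem.List.sum_map_add_int]

-- indexed 0/1 mismatch sum over equal-length char lists = B's zip diff
theorem pvZipSum (al bl : List Char) (h : al.length = bl.length) :
    ((List.range al.length).map
        (fun k => if al.getD k ' ' != bl.getD k ' ' then (1:Int) else 0)).sum
      = ((al.zip bl).map (fun p => if p.1 != p.2 then (1:Int) else 0)).sum := by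
  induction al generalizing bl with
  | nil => simp
  | cons a al ih =>
    cases bl with
    | nil => simp at h
    | cons b bl =>
      simp only [List.length_cons, List.range_succ_eq_map, List.map_cons, List.sum_cons,
        List.map_map, List.zip_cons_cons]
      simp only [List.getD_cons_zero, List.getD_cons_succ, Function.comp_def]
      rw [ih bl (by simpa using h)]

-- B's inner loop value: total mismatch count for the reflection line after position y
def pvDB (rows : List String) (y : Int) : Int :=
  ((PySem.List.pyRange 0 (min y ((rows.length : Int) - y)) 1).map
    (fun i => pvDiffB (pvRowB rows (y - 1 - i)) (pvRowB rows (y + i)))).sum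

theorem pvScoreB_eq (rows : List String) (s : Int) :
    pvScoreB rows s
      = ((PySem.List.pyRange 1 (rows.length : Int) 1).filter
          (fun y => decide (pvDB rows y = s))).sum := by
  have hb : (fun (total y : Int) =>
      let d := (PySem.List.pyRange 0 (min y ((rows.length : Int) - y)) 1).foldl
        (fun d i => d + pvDiffB (pvRowB rows (y - 1 - i)) (pvRowB rows (y + i))) 0
      if d = s then total + y else total)
      = fun total y => if pvDB rows y = s then total + y else total := by
    funext total y
    simp only [PySem.List.foldl_add, zero_add, pvDB]
    rfl
  unfold pvScoreB
  rw [hb, PySem.List.foldl_ite_eq_foldl_filter (p := fun y => pvDB rows y = s)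
    (f := fun t y => t + y)]
  exact List.sum_eq_foldl.symm

-- indexed 0/1 mismatch sum over a full-width range = B's zip diff (equal-length strings)
theorem pvRangeSum_eq_diff (a b : String) (W : Nat)
    (ha : a.toList.length = W) (hb : b.toList.length = W) :
    ((PySem.List.pyRange 0 (W : Int) 1).map
        (fun x => if pvCharA a x != pvCharA b x then (1:Int) else 0)).sum
      = pvDiffB a b := by
  unfold pvDiffB
  rw [PySem.List.foldl_add, zero_add, PySem.List.pyRange_zero_nat, List.map_map]
  have h := pvZipSum a.toList b.toList (by rw [ha, hb])
  rw [ha] at h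
  rw [← h]
  apply congrArg List.sum
  apply List.map_congr_left
  intro k hk
  rw [List.mem_range] at hk
  simp [pvCharA, List.getD_eq_getElem?_getD]

theorem pvCheckRow_eq (p : List String) (s y : Int)
    (hrect : ∀ row ∈ p, row.toList.length = (p.head?.getD "").toList.length)
    (hy1 : 1 ≤ y) (hy2 : y < (p.length : Int)) :
    pvCheckRow y p s = decide (pvDB p y = max s 0) := by
  have hhd : (PySem.List.pyGet? p 0).getD "" = p.head?.getD "" := by cases p <;> simp [PySem.List.pyGet?_zero]
  have hw : PySem.Str.len (p.head?.getD "")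
      = (((p.head?.getD "").toList.length : Nat) : Int) := PySem.Str.len_eq _
  simp only [pvCheckRow, hhd, hw]
  rw [pvGoA_start, decide_eq_decide, pvCnt_product]
  simp only [pvCnt]
  rw [pvSum_swap]
  suffices h : ((PySem.List.pyRange 0 (if 2 * y < (p.length : Int) then y else (p.length : Int) - y) 1).map
      (fun b => ((PySem.List.pyRange 0 (((p.head?.getD "").toList.length : Nat) : Int) 1).map
        (fun a => if (pvCharA ((PySem.List.pyGet? p (y - (b + 1))).getD "") a !=
                      pvCharA ((PySem.List.pyGet? p (y + b)).getD "") a) then (1:Int) else 0)).sum)).sum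
      = pvDB p y by
    rw [h]
  have ht : (if 2 * y < (p.length : Int) then y else (p.length : Int) - y)
      = min y ((p.length : Int) - y) := by split_ifs with h <;> omega
  rw [ht]
  unfold pvDB
  apply congrArg List.sum
  apply List.map_congr_left
  intro i hi
  rw [PySem.List.mem_pyRange_one] at hi
  have e1 : y - (i + 1) = y - 1 - i := by ring
  rw [e1]
  have hi1 : (0:Int) ≤ y - 1 - i := by omega
  have hi1' : y - 1 - i < (p.length : Int) := by omega
  have hi2 : (0:Int) ≤ y + i := by omega
  have hi2' : y + i < (p.length : Int) := by omega
  have hr1 : pvRowB p (y - 1 - i) = p[(y - 1 - i).toNat]'(by omega) := by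
    simp [pvRowB, PySem.List.pyGet?_eq_some_getElem p hi1 hi1']
  have hr2 : pvRowB p (y + i) = p[(y + i).toNat]'(by omega) := by
    simp [pvRowB, PySem.List.pyGet?_eq_some_getElem p hi2 hi2']
  have hrw : (PySem.List.pyGet? p (y - 1 - i)).getD "" = pvRowB p (y - 1 - i) := rfl
  have hrw2 : (PySem.List.pyGet? p (y + i)).getD "" = pvRowB p (y + i) := rfl
  rw [hrw, hrw2]
  exact pvRangeSum_eq_diff _ _ _
    (by rw [hr1]; exact hrect _ (List.getElem_mem _))
    (by rw [hr2]; exact hrect _ (List.getElem_mem _))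

-- the j-th transposed column, as B builds it
def pvColsB (p : List String) (W : Nat) : List String :=
  (PySem.List.pyRange 0 (W : Int) 1).map
    (fun x => String.ofList (p.map (fun row => (PySem.Str.pyGet? row x).getD ' ')))

theorem pvColsB_length (p : List String) (W : Nat) : (pvColsB p W).length = W := by
  simp [pvColsB, PySem.List.length_pyRange_one]

theorem pvColDiff (p : List String) (W : Nat) (j1 j2 : Int)
    (h1 : 0 ≤ j1) (h1' : j1 < (W : Int)) (h2 : 0 ≤ j2) (h2' : j2 < (W : Int)) :
    pvDiffB (pvRowB (pvColsB p W) j1) (pvRowB (pvColsB p W) j2)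
      = (p.map (fun row => if pvCharA row j1 != pvCharA row j2 then (1:Int) else 0)).sum := by
  have hget : ∀ (j : Int), 0 ≤ j → j < (W : Int) →
      pvRowB (pvColsB p W) j
        = String.ofList (p.map (fun row => (PySem.Str.pyGet? row j).getD ' ')) := by
    intro j hj hj'
    have hl : ((pvColsB p W).length : Int) = (W : Int) := by rw [pvColsB_length]
    have := PySem.List.pyGet?_eq_some_getElem (pvColsB p W) hj (by rw [hl]; exact hj')
    simp only [pvRowB, this, Option.getD_some]
    simp [pvColsB, PySem.List.getElem_pyRange_one, Int.toNat_of_nonneg hj]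
  rw [hget j1 h1 h1', hget j2 h2 h2']
  unfold pvDiffB
  rw [PySem.List.foldl_add, zero_add]
  simp only [String.toList_ofList]
  rw [List.zip_map', List.map_map]
  simp [pvCharA, Function.comp_def]

theorem pvCheckCol_eq (p : List String) (s x : Int)
    (hx1 : 1 ≤ x) (hx2 : x < (((p.head?.getD "").toList.length : Nat) : Int)) :
    pvCheckCol x p s
      = decide (pvDB (pvColsB p (p.head?.getD "").toList.length) x = max s 0) := by
  set W := (p.head?.getD "").toList.length with hWdef
  have hhd : (PySem.List.pyGet? p 0).getD "" = p.head?.getD "" := by cases p <;> simp [PySem.List.pyGet?_zero]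
  have hw : PySem.Str.len (p.head?.getD "") = ((W : Nat) : Int) := PySem.Str.len_eq _
  simp only [pvCheckCol, hhd, hw]
  rw [pvGoA_start, decide_eq_decide, pvCnt_product]
  simp only [pvCnt]
  rw [pvSum_swap]
  suffices h : ((PySem.List.pyRange 0 (if 2 * x < ((W:Nat):Int) then x else ((W:Nat):Int) - x) 1).map
      (fun b => (p.map
        (fun a => if (pvCharA a (x - (b + 1)) != pvCharA a (x + b)) then (1:Int) else 0)).sum)).sum
      = pvDB (pvColsB p W) x by
    rw [h]
  have hcl : ((pvColsB p W).length : Int) = ((W:Nat) : Int) := by rw [pvColsB_length]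
  have ht : (if 2 * x < ((W:Nat):Int) then x else ((W:Nat):Int) - x)
      = min x (((pvColsB p W).length : Int) - x) := by rw [hcl]; split_ifs with h <;> omega
  rw [ht]
  unfold pvDB
  apply congrArg List.sum
  apply List.map_congr_left
  intro i hi
  rw [PySem.List.mem_pyRange_one, hcl] at hi
  have e1 : x - (i + 1) = x - 1 - i := by ring
  rw [e1]
  exact (pvColDiff p W (x - 1 - i) (x + i)
    (by omega) (by omega) (by omega) (by omega)).symm

theorem pvMirrorAt_iff {α : Type} (l : List α) (k : Nat) (hk : k ≤ l.length) :
    pvMirrorAt l k ↔ ∀ i ∈ List.range (min k (l.length - k)), l[k - 1 - i]? = l[k + i]? := by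
  have hla : ((l.take k).reverse).length = k := by simp; omega
  have hlb : (l.drop k).length = l.length - k := by simp
  have hae : ∀ i, i < k → ((l.take k).reverse)[i]? = l[k - 1 - i]? := by
    intro i h
    rw [List.getElem?_eq_getElem (by omega), List.getElem?_eq_getElem (by omega : k - 1 - i < l.length)]
    congr 1
    rw [List.getElem_reverse, List.getElem_take]
    congr 1
    simp
    omega
  have hbe : ∀ i, i < l.length - k → (l.drop k)[i]? = l[k + i]? := by
    intro i h
    rw [List.getElem?_eq_getElem (by omega), List.getElem?_eq_getElem (by omega : k + i < l.length)]
    congr 1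
    exact List.getElem_drop ..
  constructor
  · rintro (⟨t, ht⟩ | ⟨t, ht⟩) i hi <;> rw [List.mem_range] at hi
    · have h1 : (l.drop k)[i]? = ((l.take k).reverse)[i]? := by
        rw [← ht, List.getElem?_append_left (by omega)]
      rw [← hae i (by omega), ← hbe i (by omega), h1]
    · have h1 : ((l.take k).reverse)[i]? = (l.drop k)[i]? := by
        rw [← ht, List.getElem?_append_left (by omega)]
      rw [← hae i (by omega), ← hbe i (by omega), h1]
  · intro h
    by_cases hc : k ≤ l.length - k
    · left
      rw [List.prefix_iff_eq_take, hla]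
      apply List.ext_getElem?
      intro i
      rw [List.getElem?_take]
      by_cases hik : i < k
      · rw [if_pos hik, hae i hik, hbe i (by omega)]
        exact h i (by rw [List.mem_range]; omega)
      · rw [if_neg hik, List.getElem?_eq_none (by omega)]
    · right
      rw [List.prefix_iff_eq_take, hlb]
      apply List.ext_getElem?
      intro i
      rw [List.getElem?_take]
      by_cases hik : i < l.length - k
      · rw [if_pos hik, hae i (by omega), hbe i hik]
        exact (h i (by rw [List.mem_range]; omega)).symm
      · rw [if_neg hik, List.getElem?_eq_none (by omega)]

-- Int-indexed restatements of the mirror predicates, matching A's index arithmetic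
def pvColMirrorI (p : List String) (x : Int) : Prop :=
  ∀ i ∈ PySem.List.pyRange 0 (min x ((((p.head?.getD "").toList.length) : Int) - x)) 1,
    ∀ row ∈ p,
      (PySem.Str.pyGet? row (x - 1 - i)).getD ' ' = (PySem.Str.pyGet? row (x + i)).getD ' '

def pvRowMirrorI (p : List String) (y : Int) : Prop :=
  ∀ i ∈ PySem.List.pyRange 0 (min y ((p.length : Int) - y)) 1,
    ∀ x ∈ PySem.List.pyRange 0 (((p.head?.getD "").toList.length) : Int) 1,
      (PySem.Str.pyGet? ((PySem.List.pyGet? p (y - 1 - i)).getD "") x).getD ' '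
        = (PySem.Str.pyGet? ((PySem.List.pyGet? p (y + i)).getD "") x).getD ' '

theorem pvColMirror_iff (p : List String) (x : Nat)
    (hrect : ∀ row ∈ p, row.toList.length = (p.head?.getD "").toList.length)
    (hx2 : x < (p.head?.getD "").toList.length) :
    (∀ row ∈ p, pvMirrorAt row.toList x) ↔ pvColMirrorI p (x : Int) := by
  unfold pvColMirrorI
  constructor
  · intro h i hi row hrow
    rw [PySem.List.mem_pyRange_one] at hi
    have hlen := hrect row hrow
    have hh := (pvMirrorAt_iff row.toList x (by omega)).mp (h row hrow) i.toNat
      (by rw [List.mem_range]; omega)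
    have e1 : (x : Int) - 1 - i = ((x - 1 - i.toNat : Nat) : Int) := by omega
    have e2 : (x : Int) + i = ((x + i.toNat : Nat) : Int) := by omega
    rw [e1, e2]
    simp only [PySem.Str.pyGet?_natCast]
    rw [hh]
  · intro h row hrow
    have hlen := hrect row hrow
    apply (pvMirrorAt_iff row.toList x (by omega)).mpr
    intro i hir
    rw [List.mem_range] at hir
    have hh := h (i : Int) (by rw [PySem.List.mem_pyRange_one]; omega) row hrow
    have e1 : (x : Int) - 1 - (i : Int) = ((x - 1 - i : Nat) : Int) := by omega
    have e2 : (x : Int) + (i : Int) = ((x + i : Nat) : Int) := by omega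
    rw [e1, e2] at hh
    simp only [PySem.Str.pyGet?_natCast] at hh
    have o1 : x - 1 - i < row.toList.length := by omega
    have o2 : x + i < row.toList.length := by omega
    rw [List.getElem?_eq_getElem o1, List.getElem?_eq_getElem o2] at hh ⊢
    simp only [Option.getD_some] at hh
    exact congrArg some hh

theorem pvRowMirror_iff (p : List String) (y : Nat)
    (hrect : ∀ row ∈ p, row.toList.length = (p.head?.getD "").toList.length)
    (hy2 : y < p.length) :
    pvMirrorAt (p.map String.toList) y ↔ pvRowMirrorI p (y : Int) := by
  unfold pvRowMirrorI
  constructor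
  · intro h i hi x hx
    rw [PySem.List.mem_pyRange_one] at hi hx
    have hh := (pvMirrorAt_iff (p.map String.toList) y (by simp [List.length_map]; omega)).mp h
      i.toNat (by simp only [List.mem_range, List.length_map]; omega)
    rw [List.getElem?_map, List.getElem?_map] at hh
    have hm1 : y - 1 - i.toNat < p.length := by omega
    have hm2 : y + i.toNat < p.length := by omega
    rw [List.getElem?_eq_getElem hm1, List.getElem?_eq_getElem hm2] at hh
    simp only [Option.map_some] at hh
    have hls : (p[y - 1 - i.toNat]'hm1).toList = (p[y + i.toNat]'hm2).toList :=
      Option.some.inj hh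
    have e1 : (y : Int) - 1 - i = ((y - 1 - i.toNat : Nat) : Int) := by omega
    have e2 : (y : Int) + i = ((y + i.toNat : Nat) : Int) := by omega
    have e3 : x = ((x.toNat : Nat) : Int) := by omega
    rw [e1, e2, e3]
    simp only [PySem.List.pyGet?_natCast, PySem.Str.pyGet?_natCast]
    rw [List.getElem?_eq_getElem hm1, List.getElem?_eq_getElem hm2]
    simp only [Option.getD_some]
    rw [hls]
  · intro h
    apply (pvMirrorAt_iff (p.map String.toList) y (by simp [List.length_map]; omega)).mpr
    intro i hir
    simp only [List.mem_range, List.length_map] at hir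
    have hm1 : y - 1 - i < p.length := by omega
    have hm2 : y + i < p.length := by omega
    rw [List.getElem?_map, List.getElem?_map,
      List.getElem?_eq_getElem hm1, List.getElem?_eq_getElem hm2]
    simp only [Option.map_some]
    congr 1
    apply List.ext_getElem
    · rw [hrect _ (List.getElem_mem _), hrect _ (List.getElem_mem _)]
    · intro n h1 h2
      have hxW : n < (p.head?.getD "").toList.length := by
        have := hrect _ (List.getElem_mem hm1)
        omega
      have hh := h (i : Int) (by rw [PySem.List.mem_pyRange_one]; omega)
        (n : Int) (by rw [PySem.List.mem_pyRange_one]; omega)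
      have e1 : (y : Int) - 1 - (i : Int) = ((y - 1 - i : Nat) : Int) := by omega
      have e2 : (y : Int) + (i : Int) = ((y + i : Nat) : Int) := by omega
      rw [e1, e2] at hh
      simp only [PySem.List.pyGet?_natCast, PySem.Str.pyGet?_natCast] at hh
      rw [List.getElem?_eq_getElem hm1, List.getElem?_eq_getElem hm2] at hh
      simp only [Option.getD_some] at hh
      rw [List.getElem?_eq_getElem h1, List.getElem?_eq_getElem h2] at hh
      simp only [Option.getD_some] at hh
      exact hh

-- ----- zero / positivity helpers for the negative-smudges region -----

theorem pvSumNonneg {α : Type} (l : List α) (f : α → Int) (h : ∀ x ∈ l, 0 ≤ f x) :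
    0 ≤ (l.map f).sum := by
  induction l with
  | nil => simp
  | cons a l ih =>
    simp only [List.map_cons, List.sum_cons]
    have h1 := h a (by simp)
    have h2 := ih (fun x hx => h x (by simp [hx]))
    omega

theorem pvSumNonnegL (l : List Int) (h : ∀ z ∈ l, 0 ≤ z) : 0 ≤ l.sum := by
  have := pvSumNonneg l (fun z => z) h
  simpa using this

theorem pvSumZero {α : Type} (l : List α) (f : α → Int) (h : ∀ x ∈ l, 0 ≤ f x) :
    (l.map f).sum = 0 ↔ ∀ x ∈ l, f x = 0 := by
  induction l with
  | nil => simp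
  | cons a l ih =>
    simp only [List.map_cons, List.sum_cons, List.mem_cons]
    have h1 := h a (by simp)
    have h2 := pvSumNonneg l f (fun x hx => h x (by simp [hx]))
    have ih' := ih (fun x hx => h x (by simp [hx]))
    constructor
    · intro h0 x hx
      rcases hx with rfl | hx
      · omega
      · exact ih'.mp (by omega) x hx
    · intro hall
      have ha : f a = 0 := hall a (Or.inl rfl)
      have hl : (l.map f).sum = 0 := ih'.mpr (fun x hx => hall x (Or.inr hx))
      omega

theorem pvDiffB_nonneg (a b : String) : 0 ≤ pvDiffB a b := by
  unfold pvDiffB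
  rw [PySem.List.foldl_add, zero_add]
  exact pvSumNonneg _ _ (fun x _ => by split <;> omega)

theorem pvScoreB_neg (rows : List String) (s : Int) (hs : s < 0) : pvScoreB rows s = 0 := by
  unfold pvScoreB
  rw [PySem.List.foldl_congr_mem _ _ (fun total _ => total) 0 ?_]
  · exact PySem.List.foldl_ignore _ _
  · intro acc y _
    simp only [PySem.List.foldl_add, zero_add]
    rw [if_neg]
    have := pvSumNonneg (PySem.List.pyRange 0 (min y ((rows.length : Int) - y)) 1)
      (fun i => pvDiffB (pvRowB rows (y - 1 - i)) (pvRowB rows (y + i)))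
      (fun i _ => pvDiffB_nonneg _ _)
    omega

theorem pvDiffB_zero_iff (a b : String) (W : Nat)
    (ha : a.toList.length = W) (hb : b.toList.length = W) :
    pvDiffB a b = 0 ↔ ∀ x ∈ PySem.List.pyRange 0 (W : Int) 1, pvCharA a x = pvCharA b x := by
  rw [← pvRangeSum_eq_diff a b W ha hb,
    pvSumZero _ _ (fun x _ => by split <;> omega)]
  constructor <;> intro h x hx <;> have hh := h x hx
  · by_contra hne
    rw [if_pos (by simpa [bne_iff_ne] using hne)] at hh
    exact absurd hh one_ne_zero
  · simp [hh]

theorem pvDB_row_zero_iff (p : List String) (y : Int)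
    (hrect : ∀ row ∈ p, row.toList.length = (p.head?.getD "").toList.length)
    (hy1 : 1 ≤ y) (hy2 : y < (p.length : Int)) :
    pvDB p y = 0 ↔ pvRowMirrorI p y := by
  unfold pvDB pvRowMirrorI
  rw [pvSumZero _ _ (fun i _ => pvDiffB_nonneg _ _)]
  constructor <;> intro h i hi <;> have hh := h i hi <;> rw [PySem.List.mem_pyRange_one] at hi
  all_goals
    have hi1 : (0:Int) ≤ y - 1 - i := by omega
    have hi1' : y - 1 - i < (p.length : Int) := by omega
    have hi2 : (0:Int) ≤ y + i := by omega
    have hi2' : y + i < (p.length : Int) := by omega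
    have hr1 : pvRowB p (y - 1 - i) = p[(y - 1 - i).toNat]'(by omega) := by
      simp [pvRowB, PySem.List.pyGet?_eq_some_getElem p hi1 hi1']
    have hr2 : pvRowB p (y + i) = p[(y + i).toNat]'(by omega) := by
      simp [pvRowB, PySem.List.pyGet?_eq_some_getElem p hi2 hi2']
    have hiff := pvDiffB_zero_iff (pvRowB p (y - 1 - i)) (pvRowB p (y + i))
      (p.head?.getD "").toList.length
      (by rw [hr1]; exact hrect _ (List.getElem_mem _))
      (by rw [hr2]; exact hrect _ (List.getElem_mem _))
  · exact hiff.mp hh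
  · exact hiff.mpr hh

theorem pvDB_col_zero_iff (p : List String) (x : Int)
    (hx1 : 1 ≤ x) (hx2 : x < (((p.head?.getD "").toList.length : Nat) : Int)) :
    pvDB (pvColsB p (p.head?.getD "").toList.length) x = 0 ↔ pvColMirrorI p x := by
  set W := (p.head?.getD "").toList.length with hWdef
  have hcl : ((pvColsB p W).length : Int) = ((W : Nat) : Int) := by rw [pvColsB_length]
  unfold pvDB pvColMirrorI
  rw [hcl, pvSumZero _ _ (fun i _ => pvDiffB_nonneg _ _)]
  constructor <;> intro h i hi <;> have hh := h i hi <;> rw [PySem.List.mem_pyRange_one] at hi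
  · rw [pvColDiff p W (x - 1 - i) (x + i) (by omega) (by omega) (by omega) (by omega)] at hh
    have h2 := (pvSumZero p _ (fun r _ => by split <;> omega)).mp hh
    intro row hrow
    have h3 := h2 row hrow
    by_contra hne
    rw [if_pos (by simpa [bne_iff_ne] using hne)] at h3
    exact absurd h3 one_ne_zero
  · rw [pvColDiff p W (x - 1 - i) (x + i) (by omega) (by omega) (by omega) (by omega)]
    exact (pvSumZero p _ (fun r _ => by split <;> omega)).mpr
      (fun row hrow => by simpa [pvCharA] using hh row hrow)

-- A's column/row filters are empty when smudges < 0 and the pattern has no perfect mirror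
theorem pvRowFilter_nil (p : List String) (s : Int) (hs : s < 0)
    (hrect : ∀ row ∈ p, row.toList.length = (p.head?.getD "").toList.length)
    (hnorow : ∀ k ∈ List.range p.length, ¬ (0 < k ∧ pvMirrorAt (p.map String.toList) k)) :
    (PySem.List.pyRange 1 (p.length : Int) 1).filter (fun y => pvCheckRow y p s) = [] := by
  rw [List.filter_eq_nil_iff]
  intro y hy
  have hym := hy
  rw [PySem.List.mem_pyRange_one] at hy
  rw [pvCheckRow_eq p s y hrect hy.1 hy.2]
  simp only [decide_eq_true_eq]
  intro h0
  rw [max_eq_right (le_of_lt hs)] at h0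
  have hmirI : pvRowMirrorI p y := (pvDB_row_zero_iff p y hrect hy.1 hy.2).mp h0
  have hyc : ((y.toNat : Nat) : Int) = y := by omega
  have hmir : pvMirrorAt (p.map String.toList) y.toNat :=
    (pvRowMirror_iff p y.toNat hrect (by omega)).mpr (by rw [hyc]; exact hmirI)
  exact hnorow y.toNat (by rw [List.mem_range]; omega) ⟨by omega, hmir⟩

theorem pvColFilter_nil (p : List String) (s : Int) (hs : s < 0)
    (hrect : ∀ row ∈ p, row.toList.length = (p.head?.getD "").toList.length)
    (hnocol : ∀ k ∈ List.range ((p.head?.getD "").toList.length), ¬ (0 < k ∧ ∀ row ∈ p, pvMirrorAt row.toList k)) :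
    (PySem.List.pyRange 1 ((((p.head?.getD "").toList.length) : Nat) : Int) 1).filter
      (fun x => pvCheckCol x p s) = [] := by
  rw [List.filter_eq_nil_iff]
  intro x hx
  have hxm := hx
  rw [PySem.List.mem_pyRange_one] at hx
  rw [pvCheckCol_eq p s x hx.1 hx.2]
  simp only [decide_eq_true_eq]
  intro h0
  rw [max_eq_right (le_of_lt hs)] at h0
  have hmirI : pvColMirrorI p x := (pvDB_col_zero_iff p x hx.1 hx.2).mp h0
  have hxc : ((x.toNat : Nat) : Int) = x := by omega
  have hmir : ∀ row ∈ p, pvMirrorAt row.toList x.toNat :=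
    (pvColMirror_iff p x.toNat hrect (by omega)).mpr (by rw [hxc]; exact hmirI)
  exact hnocol x.toNat (by rw [List.mem_range]; omega) ⟨by omega, hmir⟩

theorem reflection_lines_sum_spec : Claim_unchanged_reflection_lines_sum := by
  intro patterns smudges _hdom hpre hnd
  unfold reflection_lines_sum reflection_lines_sum_alt
  apply PySem.List.foldl_congr_mem
  intro acc p hpmem
  obtain ⟨hne, hrect⟩ := hpre p hpmem
  have hhd : (PySem.List.pyGet? p 0).getD "" = p.head?.getD "" := by
    cases p <;> simp [PySem.List.pyGet?_zero]
  have hw : PySem.Str.len (p.head?.getD "") = (((p.head?.getD "").toList.length : Nat) : Int) :=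
    PySem.Str.len_eq _
  simp only [hhd, hw]
  set W := (p.head?.getD "").toList.length with hWdef
  have hcols : ((PySem.List.pyRange 0 ((W:Nat):Int) 1).map
      (fun x => String.ofList (p.map (fun row => (PySem.Str.pyGet? row x).getD ' '))))
      = pvColsB p W := rfl
  rw [hcols]
  by_cases hs : 0 ≤ smudges
  · -- non-negative smudges: both sides score exactly the lines with 'smudges' mismatches
    have hrow : ((PySem.List.pyRange 1 (p.length : Int) 1).filter
        (fun y => pvCheckRow y p smudges)).sum = pvScoreB p smudges := by
      rw [pvScoreB_eq]
      apply congrArg List.sum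
      apply List.filter_congr
      intro y hy
      rw [PySem.List.mem_pyRange_one] at hy
      exact (pvCheckRow_eq p smudges y hrect hy.1 hy.2).trans (by rw [max_eq_left hs])
    have hcol : ((PySem.List.pyRange 1 ((W:Nat):Int) 1).filter
        (fun x => pvCheckCol x p smudges)).sum = pvScoreB (pvColsB p W) smudges := by
      rw [pvScoreB_eq]
      have hcl : ((pvColsB p W).length : Int) = ((W:Nat) : Int) := by rw [pvColsB_length]
      rw [hcl]
      apply congrArg List.sum
      apply List.filter_congr
      intro x hx
      rw [PySem.List.mem_pyRange_one] at hx
      exact (pvCheckCol_eq p smudges x hx.1 hx.2).trans (by rw [max_eq_left hs])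
    rw [hrow, hcol]
    ring
  · -- negative smudges outside D_: no pattern has a perfect mirror, so both sides add 0
    replace hs : smudges < 0 := by omega
    have hnocol : ∀ k ∈ List.range ((p.head?.getD "").toList.length), ¬ (0 < k ∧ ∀ row ∈ p, pvMirrorAt row.toList k) :=
      fun k hk hc => hnd ⟨hs, p, hpmem, Or.inl ⟨k, hk, hc⟩⟩
    have hnorow : ∀ k ∈ List.range p.length, ¬ (0 < k ∧ pvMirrorAt (p.map String.toList) k) :=
      fun k hk hc => hnd ⟨hs, p, hpmem, Or.inr ⟨k, hk, hc⟩⟩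
    rw [pvRowFilter_nil p smudges hs hrect hnorow, pvColFilter_nil p smudges hs hrect hnocol,
      pvScoreB_neg _ _ hs, pvScoreB_neg _ _ hs]
    simp

theorem reflection_lines_sum_changed : Claim_changed_reflection_lines_sum := by
  unfold Claim_changed_reflection_lines_sum
  decide

theorem reflection_lines_sum_tight : Claim_exact_reflection_lines_sum := by
  intro patterns smudges _hdom hpre hd
  obtain ⟨hs, p, hpmem, hline⟩ := hd
  have hB : reflection_lines_sum_alt patterns smudges = 0 := by
    unfold reflection_lines_sum_alt
    rw [PySem.List.foldl_congr_mem _ _ (fun total _ => total) 0 ?_]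
    · exact PySem.List.foldl_ignore _ _
    · intro acc q _
      simp only [pvScoreB_neg _ _ hs]
      ring
  obtain ⟨hne, hrect⟩ := hpre p hpmem
  have hhd : (PySem.List.pyGet? p 0).getD "" = p.head?.getD "" := by
    cases p <;> simp [PySem.List.pyGet?_zero]
  have hw : PySem.Str.len (p.head?.getD "") = (((p.head?.getD "").toList.length : Nat) : Int) :=
    PySem.Str.len_eq _
  set W := (p.head?.getD "").toList.length with hWdef
  -- per-pattern contribution of A
  set g : List String → Int := fun pattern =>
    ((PySem.List.pyRange 1 (PySem.Str.len ((PySem.List.pyGet? pattern 0).getD "")) 1).filter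
      (fun x => pvCheckCol x pattern smudges)).sum +
    ((PySem.List.pyRange 1 (pattern.length : Int) 1).filter
      (fun y => pvCheckRow y pattern smudges)).sum * 100 with hgdef
  have hA : reflection_lines_sum patterns smudges = 0 + (patterns.map g).sum :=
    PySem.List.foldl_add patterns g 0
  have hfilter_nonneg : ∀ (l : List Int) (pred : Int → Bool) (a b : Int), 0 < a →
      l = (PySem.List.pyRange a b 1).filter pred → 0 ≤ l.sum := by
    intro l pred a b ha hl
    apply pvSumNonnegL
    intro z hz
    rw [hl] at hz
    have := (PySem.List.mem_pyRange_one).mp (List.mem_filter.mp hz).1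
    omega
  have hgnonneg : ∀ q ∈ patterns.map g, 0 ≤ q := by
    intro q hq
    rw [List.mem_map] at hq
    obtain ⟨r, _, rfl⟩ := hq
    have h1 := hfilter_nonneg _ _ _ _ one_pos (rfl :
      ((PySem.List.pyRange 1 (PySem.Str.len ((PySem.List.pyGet? r 0).getD "")) 1).filter
        (fun x => pvCheckCol x r smudges)) = _)
    have h2 := hfilter_nonneg _ _ _ _ one_pos (rfl :
      ((PySem.List.pyRange 1 (r.length : Int) 1).filter
        (fun y => pvCheckRow y r smudges)) = _)
    rw [hgdef]
    dsimp only
    omega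
  have hgpos : 0 < g p := by
    rcases hline with ⟨x0, hx0r, hx0pos, hmir⟩ | ⟨y0, hy0r, hy0pos, hmir⟩
    · rw [List.mem_range] at hx0r
      have hmirI : pvColMirrorI p (x0 : Int) := (pvColMirror_iff p x0 hrect hx0r).mp hmir
      have hx0m : (x0 : Int) ∈ PySem.List.pyRange 1 ((W:Nat):Int) 1 := by
        rw [PySem.List.mem_pyRange_one]; omega
      have hcheck : pvCheckCol (x0 : Int) p smudges = true := by
        rw [pvCheckCol_eq p smudges (x0 : Int) (by omega) (by omega)]
        simp only [decide_eq_true_eq]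
        rw [max_eq_right (le_of_lt hs)]
        exact (pvDB_col_zero_iff p (x0 : Int) (by omega) (by omega)).mpr hmirI
      have hxin : (x0 : Int) ∈ (PySem.List.pyRange 1 ((W:Nat):Int) 1).filter
          (fun x => pvCheckCol x p smudges) := List.mem_filter.mpr ⟨hx0m, hcheck⟩
      have hle : (x0 : Int) ≤ ((PySem.List.pyRange 1 ((W:Nat):Int) 1).filter
          (fun x => pvCheckCol x p smudges)).sum := by
        apply List.single_le_sum _ _ hxin
        intro z hz
        have := (PySem.List.mem_pyRange_one).mp (List.mem_filter.mp hz).1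
        omega
      have h2 := hfilter_nonneg ((PySem.List.pyRange 1 (p.length : Int) 1).filter
        (fun y => pvCheckRow y p smudges)) _ _ _ one_pos rfl
      rw [hgdef]
      dsimp only
      rw [hhd, hw]
      omega
    · rw [List.mem_range] at hy0r
      have hmirI : pvRowMirrorI p (y0 : Int) := (pvRowMirror_iff p y0 hrect hy0r).mp hmir
      have hy0m : (y0 : Int) ∈ PySem.List.pyRange 1 (p.length : Int) 1 := by
        rw [PySem.List.mem_pyRange_one]; omega
      have hcheck : pvCheckRow (y0 : Int) p smudges = true := by
        rw [pvCheckRow_eq p smudges (y0 : Int) hrect (by omega) (by omega)]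
        simp only [decide_eq_true_eq]
        rw [max_eq_right (le_of_lt hs)]
        exact (pvDB_row_zero_iff p (y0 : Int) hrect (by omega) (by omega)).mpr hmirI
      have hyin : (y0 : Int) ∈ (PySem.List.pyRange 1 (p.length : Int) 1).filter
          (fun y => pvCheckRow y p smudges) := List.mem_filter.mpr ⟨hy0m, hcheck⟩
      have hle : (y0 : Int) ≤ ((PySem.List.pyRange 1 (p.length : Int) 1).filter
          (fun y => pvCheckRow y p smudges)).sum := by
        apply List.single_le_sum _ _ hyin
        intro z hz
        have := (PySem.List.mem_pyRange_one).mp (List.mem_filter.mp hz).1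
        omega
      have h1 := hfilter_nonneg ((PySem.List.pyRange 1
        (PySem.Str.len ((PySem.List.pyGet? p 0).getD "")) 1).filter
        (fun x => pvCheckCol x p smudges)) _ _ _ one_pos rfl
      rw [hgdef]
      dsimp only
      omega
  have hApos : 0 < reflection_lines_sum patterns smudges := by
    rw [hA, zero_add]
    have := List.single_le_sum hgnonneg (g p) (List.mem_map_of_mem hpmem)
    omega
  rw [hB]
  exact ne_of_gt hApos
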